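-- pv_equiv track=rewrite | github.com/CaMoCBaJL/kumir2 | kumir_tests/test_script.py | remove_control_characters
-- ===== SOURCE A (Python) =====
-- CONTROL_CHARACTERS = ["\n", "\r", "\t", " "]
--
-- def remove_control_characters(data_array):
--     result = []
--     for i in data_array:
--         for cc in CONTROL_CHARACTERS:
--             i = i.replace(cc, "")
--
--         if i:
--             result.append(i)
--
--     return result
-- ===== SOURCE B (Python) =====
-- WS = frozenset("\n\r\t ")
--
-- def remove_control_characters(data_array):
--     cleaned = [''.join(c for c in s if c not in WS) for s in data_array]
--     return [t for t in cleaned if t]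
-- ===== Notes on version B (the rewrite author's own statement) =====
-- stated objective: idiomatic
-- what changed: Replaces A's accumulator loop with four sequential whole-string .replace scans per element by two staged comprehensions: a map that strips the whitespace characters in one character-level pass, then a filter dropping empty strings.
import Mathlib
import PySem

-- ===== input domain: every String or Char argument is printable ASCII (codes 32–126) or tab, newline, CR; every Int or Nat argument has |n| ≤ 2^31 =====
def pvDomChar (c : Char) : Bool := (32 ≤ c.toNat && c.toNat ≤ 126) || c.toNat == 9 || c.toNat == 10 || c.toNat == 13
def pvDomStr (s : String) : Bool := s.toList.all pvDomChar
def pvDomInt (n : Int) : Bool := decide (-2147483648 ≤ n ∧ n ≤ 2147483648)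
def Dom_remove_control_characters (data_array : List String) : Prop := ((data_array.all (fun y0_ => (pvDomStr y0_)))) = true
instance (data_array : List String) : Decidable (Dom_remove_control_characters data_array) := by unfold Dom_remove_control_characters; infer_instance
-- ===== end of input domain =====

-- B strips the whitespace characters in one character-level pass per string and drops
-- empties with a separate filter stage, instead of A's accumulator loop of four
-- whole-string replace scans (objective: idiomatic).

-- ===== PORT A =====
def CONTROL_CHARACTERS : List String := ["\n", "\r", "\t", " "]

-- one iteration of A's loop body: four sequential replaces, then the emptiness guard
def stepA (result : List String) (i : String) : List String :=
  let i := CONTROL_CHARACTERS.foldl (fun i cc => PySem.Str.replace i cc "") i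
  if i == "" then result else result ++ [i]

def remove_control_characters (data_array : List String) : List String :=
  data_array.foldl stepA []

-- ===== PORT B =====
def WS : List Char := ['\n', '\r', '\t', ' ']

-- ''.join(c for c in s if c not in WS)
def cleanB (s : String) : String :=
  String.ofList (s.toList.filter (fun c => !WS.contains c))

def remove_control_characters_alt (data_array : List String) : List String :=
  (data_array.map cleanB).filter (fun t => !(t == ""))

-- ===== PRECONDITION & SPEC =====
def Spec_remove_control_characters (data_array : List String) (out : List String) : Prop := out = remove_control_characters_alt data_array
instance (data_array : List String) (out : List String) : Decidable (Spec_remove_control_characters data_array out) := by unfold Spec_remove_control_characters; infer_instance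

-- ===== CLAIM (what is proved, stated in full; the proofs are below) =====
def Claim_equal_remove_control_characters : Prop := ∀ (data_array : List String), Dom_remove_control_characters data_array → Spec_remove_control_characters data_array (remove_control_characters data_array)

-- ===== LEMMAS AND PROOFS =====

-- the fuel-driven replace loop with a one-character pattern and empty replacement is a filter
theorem replace_go_single (c : Char) :
    ∀ (l : List Char) (fuel : Nat) (acc : List Char), l.length ≤ fuel →
      PySem.Chars.replace.go [c] [] fuel l acc = acc.reverse ++ l.filter (fun x => x != c) := by
  intro l
  induction l with
  | nil =>
    intro fuel acc _
    cases fuel <;> simp [PySem.Chars.replace.go]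
  | cons c' t ih =>
    intro fuel acc hle
    cases fuel with
    | zero => simp at hle
    | succ f =>
      have hlen : t.length ≤ f := by simp at hle; omega
      by_cases hc : c' = c
      · subst hc
        have hp : List.isPrefixOf [c'] (c' :: t) = true := by simp [List.isPrefixOf]
        rw [PySem.Chars.replace.go, hp]
        simpa [List.filter_cons] using ih f acc hlen
      · have hp2 : List.isPrefixOf [c] (c' :: t) = false := by
          simp [List.isPrefixOf]; exact fun h => hc h.symm
        rw [PySem.Chars.replace.go, hp2]
        simp only [Bool.false_eq_true, if_neg, not_false_iff]
        rw [ih f (c' :: acc) hlen]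
        have hne : (c' != c) = true := by simp [bne, hc]
        simp [hne]

theorem replace_single (s : List Char) (c : Char) :
    PySem.Chars.replace s [c] [] = s.filter (fun x => x != c) := by
  simp only [PySem.Chars.replace, List.isEmpty]
  exact replace_go_single c s s.length [] le_rfl

theorem str_replace_single (t : String) (c : Char) :
    PySem.Str.replace t (String.ofList [c]) "" = String.ofList (t.toList.filter (fun x => x != c)) := by
  apply String.toList_inj.mp
  rw [PySem.Str.toList_replace]
  simp [replace_single]

-- A's four sequential replaces on one string equal B's single filter pass
theorem clean_eq (s : String) :
    CONTROL_CHARACTERS.foldl (fun i cc => PySem.Str.replace i cc "") s = cleanB s := by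
  have h1 : ("\n" : String) = String.ofList [(Char.ofNat 10)] := by decide
  have h2 : ("\r" : String) = String.ofList [(Char.ofNat 13)] := by decide
  have h3 : ("\t" : String) = String.ofList [(Char.ofNat 9)] := by decide
  have h4 : (" " : String) = String.ofList [(Char.ofNat 32)] := by decide
  show PySem.Str.replace (PySem.Str.replace (PySem.Str.replace (PySem.Str.replace s "\n" "") "\r" "") "\t" "") " " "" = _
  simp only [h1, h2, h3, h4, str_replace_single, String.toList_ofList, List.filter_filter]
  unfold cleanB
  congr 1
  apply List.filter_congr
  intro a _
  simp only [WS, List.contains_cons, List.contains_nil, bne]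
  rw [show Char.ofNat 10 = '\n' from rfl, show Char.ofNat 13 = '\x0d' from rfl,
    show Char.ofNat 9 = '\t' from rfl, show Char.ofNat 32 = ' ' from rfl]
  cases b1 : (a == '\n') <;> cases b2 : (a == '\x0d') <;> cases b3 : (a == '\t') <;>
    cases b4 : (a == ' ') <;> simp

-- A's accumulator loop produces the filtered map of cleaned strings
theorem foldl_stepA (l : List String) (acc : List String) :
    l.foldl stepA acc = acc ++ ((l.filter (fun s => !(cleanB s == ""))).map cleanB) := by
  induction l generalizing acc with
  | nil => simp
  | cons s t ih =>
    rw [List.foldl_cons, ih]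
    unfold stepA
    rw [clean_eq]
    by_cases h : cleanB s == ""
    · simp [h]
    · simp only [Bool.not_eq_true] at h
      simp [h]

-- ===== VERDICT (by name: the statement is the Claim_ definition above) =====
theorem remove_control_characters_spec : Claim_equal_remove_control_characters := by
  intro data_array _
  unfold Spec_remove_control_characters remove_control_characters remove_control_characters_alt
  rw [foldl_stepA, List.filter_map]
  simp [Function.comp_def]
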